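-- pv_equiv track=rewrite | github.com/LepsyMikolaj3301/Matura__2023 | MATURY I ZADANIA/CKE/2021/maj/zadanie4.py | napis_kod
-- ===== SOURCE A (Python) =====
-- def napis_kod(tablica_whole):
--     napis = []
--
--     def cycle(l):
--         ord_l = ord(l)
--         if ord_l == 90:
--             return chr(65)
--         return chr(ord_l + 1)
--
--     for tablica in tablica_whole:
--         komenda, litera = tablica[0], tablica[1]
--         if komenda == 'DOPISZ':
--             napis.append(litera)
--         elif komenda == "ZMIEN":
--             napis[-1] = litera
--         elif komenda == "USUN":
--             napis.pop()
--         elif komenda == "PRZESUN":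
--             for i, j in enumerate(napis):
--                 if j == litera:
--                     napis[i] = cycle(j)
--                     break
--     return napis
-- ===== SOURCE B (Python) =====
-- def napis_kod(tablica_whole):
--     # Different algorithm: besides the stack, keep for every letter the sorted
--     # list of positions where it occurs, so PRZESUN finds the first occurrence
--     # without scanning the stack.
--     napis = []
--     pos = {}  # letter -> increasing list of indices i with napis[i] == letter
--
--     def cyc(l):
--         return 'A' if l == 'Z' else chr(ord(l) + 1)
--
--     def insort(lst, x):
--         i = 0
--         while i < len(lst) and lst[i] < x:
--             i += 1
--         lst.insert(i, x)
--
--     for row in tablica_whole: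
--         komenda, litera = row[0], row[1]
--         if komenda == 'DOPISZ':
--             pos.setdefault(litera, []).append(len(napis))
--             napis.append(litera)
--         elif komenda == 'ZMIEN':
--             i = len(napis) - 1
--             pos[napis[i]].pop()
--             napis[i] = litera
--             pos.setdefault(litera, []).append(i)
--         elif komenda == 'USUN':
--             old = napis.pop()
--             pos[old].pop()
--         elif komenda == 'PRZESUN':
--             lst = pos.get(litera)
--             if lst:
--                 i = lst.pop(0)
--                 c = cyc(napis[i])
--                 napis[i] = c
--                 insort(pos.setdefault(c, []), i)
--     return napis
-- ===== Notes on version B (the rewrite author's own statement) =====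
-- stated objective: alternative
-- what changed: B keeps, next to the stack, a dictionary mapping each letter to the sorted list of its current positions, so PRZESUN locates the first occurrence by one dictionary lookup instead of scanning the stack.
-- outside the precondition, e.g. on napis_kod([['DOPISZ', 'ab'], ['USUN', 'x'], ['PRZESUN', 'ab']]): A returns [], B returns []
import Mathlib
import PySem

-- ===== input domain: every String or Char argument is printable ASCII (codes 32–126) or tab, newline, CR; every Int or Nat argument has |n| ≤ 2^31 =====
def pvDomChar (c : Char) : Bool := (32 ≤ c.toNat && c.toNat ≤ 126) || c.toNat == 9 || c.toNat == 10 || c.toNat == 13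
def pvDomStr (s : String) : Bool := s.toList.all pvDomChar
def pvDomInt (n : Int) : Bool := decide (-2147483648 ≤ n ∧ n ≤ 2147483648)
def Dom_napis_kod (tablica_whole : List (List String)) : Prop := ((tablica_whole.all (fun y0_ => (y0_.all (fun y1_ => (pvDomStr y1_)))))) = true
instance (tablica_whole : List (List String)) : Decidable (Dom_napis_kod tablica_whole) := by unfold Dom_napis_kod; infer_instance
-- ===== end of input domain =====

-- B replaces A's linear scan of the stack on every PRZESUN by a per-letter index of
-- positions kept alongside the stack (objective: alternative — a different data
-- structure; the measured cost is comparable to A's).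

-- ===== PORT A =====

-- cycle(l): ord raises on a non-single-char string (excluded by Pre_); fallback returns l there
def pvCycleA (l : String) : String :=
  match l.toList with
  | [c] => if c.toNat = 90 then "A" else String.ofList [Char.ofNat (c.toNat + 1)]
  | _ => l

-- the PRZESUN loop of A: replace the first element equal to lit by its cycle
def pvPrzesunA (lit : String) : List String → List String
  | [] => []
  | j :: rest => if j = lit then pvCycleA j :: rest else j :: pvPrzesunA lit rest

def pvStepA (napis : List String) (row : List String) : List String :=
  let komenda := PySem.List.pyGetD row 0 ""
  let litera := PySem.List.pyGetD row 1 ""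
  if komenda = "DOPISZ" then napis ++ [litera]
  else if komenda = "ZMIEN" then napis.dropLast ++ [litera]   -- napis[-1] = litera (nonempty under Pre_)
  else if komenda = "USUN" then napis.dropLast                -- napis.pop()  (nonempty under Pre_)
  else if komenda = "PRZESUN" then pvPrzesunA litera napis
  else napis

def napis_kod (tablica_whole : List (List String)) : List String :=
  tablica_whole.foldl pvStepA []

-- ===== PORT B =====

def pvCycleB (l : String) : String :=
  match l.toList with
  | [c] => if c.toNat = 90 then "A" else String.ofList [Char.ofNat (c.toNat + 1)]
  | _ => l

-- Source B's hand-written insort (insert x before the first element not below it)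
def pvInsort (lst : List Int) (x : Int) : List Int :=
  match lst with
  | [] => [x]
  | y :: ys => if y < x then y :: pvInsort ys x else x :: y :: ys

def pvStepB (st : List String × PySem.Dict String (List Int)) (row : List String) :
    List String × PySem.Dict String (List Int) :=
  let napis := st.1
  let pos := st.2
  let komenda := PySem.List.pyGetD row 0 ""
  let litera := PySem.List.pyGetD row 1 ""
  if komenda = "DOPISZ" then
    (napis ++ [litera], pos.insert litera (pos.getD litera [] ++ [(napis.length : Int)]))
  else if komenda = "ZMIEN" then
    let i : Int := (napis.length : Int) - 1
    let old := napis.getLastD ""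
    let pos1 := pos.insert old (pos.getD old []).dropLast
    (napis.dropLast ++ [litera], pos1.insert litera (pos1.getD litera [] ++ [i]))
  else if komenda = "USUN" then
    let old := napis.getLastD ""
    (napis.dropLast, pos.insert old (pos.getD old []).dropLast)
  else if komenda = "PRZESUN" then
    match pos.getD litera [] with
    | [] => (napis, pos)
    | i :: rest =>
      let c := pvCycleB (PySem.List.pyGetD napis i "")
      let pos1 := pos.insert litera rest
      (PySem.List.pySetD napis i c, pos1.insert c (pvInsort (pos1.getD c []) i))
  else (napis, pos)

def napis_kod_alt (tablica_whole : List (List String)) : List String :=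
  (tablica_whole.foldl pvStepB ([], PySem.Dict.empty)).1

-- ===== PRECONDITION & SPEC =====

def pvKom (row : List String) : String := PySem.List.pyGetD row 0 ""
def pvLit (row : List String) : String := PySem.List.pyGetD row 1 ""

-- the letters the DOPISZ/ZMIEN commands of tw may push on the stack
def pvLits (tw : List (List String)) : List String :=
  tw.filterMap (fun r => if pvKom r = "DOPISZ" ∨ pvKom r = "ZMIEN" then some (pvLit r) else none)

-- no ZMIEN/USUN on an empty stack (d tracks the stack depth, nothing else)
def pvBalOk (d : Nat) : List (List String) → Bool
  | [] => true
  | row :: rest =>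
    if pvKom row = "DOPISZ" then pvBalOk (d + 1) rest
    else if pvKom row = "ZMIEN" then decide (0 < d) && pvBalOk d rest
    else if pvKom row = "USUN" then decide (0 < d) && pvBalOk (d - 1) rest
    else pvBalOk d rest

-- Pre_ excludes the inputs where Python A raises: a command row shorter than 2
-- (IndexError), ZMIEN/USUN on an empty stack (IndexError), and — over-approximating the
-- TypeError in ord that both programs hit when a PRZESUN matches a multi-character
-- string — every PRZESUN whose letter is not a single character yet occurs as a
-- DOPISZ/ZMIEN letter in an earlier row (even if it never actually matches).
def Pre_napis_kod (tablica_whole : List (List String)) : Prop :=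
  (∀ row ∈ tablica_whole, 2 ≤ row.length) ∧
  pvBalOk 0 tablica_whole = true ∧
  (∀ k, (hk : k < tablica_whole.length) → pvKom tablica_whole[k] = "PRZESUN" →
      (pvLit tablica_whole[k]).toList.length = 1 ∨
        pvLit tablica_whole[k] ∉ pvLits (tablica_whole.take k))

instance (tablica_whole : List (List String)) : Decidable (Pre_napis_kod tablica_whole) := by
  unfold Pre_napis_kod; infer_instance

def pvWitness_napis_kod : List (List String) :=
  [["DOPISZ", "A"], ["DOPISZ", "Z"], ["PRZESUN", "Z"], ["ZMIEN", "B"], ["PRZESUN", "A"], ["USUN", "C"]]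

def Spec_napis_kod (tablica_whole : List (List String)) (out : List String) : Prop := out = napis_kod_alt tablica_whole
instance (tablica_whole : List (List String)) (out : List String) : Decidable (Spec_napis_kod tablica_whole out) := by unfold Spec_napis_kod; infer_instance

-- ===== CLAIM (what is proved, stated in full; the proofs are below) =====
def Claim_equal_napis_kod : Prop := ∀ (tablica_whole : List (List String)), Dom_napis_kod tablica_whole → Pre_napis_kod tablica_whole → Spec_napis_kod tablica_whole (napis_kod tablica_whole)

-- ===== LEMMAS AND PROOFS =====

-- The positions of letter c in the stack, offset by k: the value B's dictionary holds.
def pvPosFrom (k : Int) (l : List String) (c : String) : List Int :=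
  match l with
  | [] => []
  | x :: xs => (if x = c then [k] else []) ++ pvPosFrom (k + 1) xs c

theorem pvPosFrom_append (k : Int) (l₁ l₂ : List String) (c : String) :
    pvPosFrom k (l₁ ++ l₂) c = pvPosFrom k l₁ c ++ pvPosFrom (k + l₁.length) l₂ c := by
  induction l₁ generalizing k with
  | nil => simp [pvPosFrom]
  | cons x xs ih =>
    simp only [List.cons_append, pvPosFrom, ih (k + 1), List.length_cons, List.append_assoc]
    have : k + ((xs.length + 1 : Nat) : Int) = k + 1 + (xs.length : Int) := by push_cast; ring
    rw [this]

theorem pvPosFrom_bounds (k : Int) (l : List String) (c : String) :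
    ∀ i ∈ pvPosFrom k l c, k ≤ i ∧ i < k + l.length := by
  induction l generalizing k with
  | nil => simp [pvPosFrom]
  | cons x xs ih =>
    intro i hi
    simp only [pvPosFrom, List.mem_append] at hi
    rcases hi with hi | hi
    · have hik : i = k := by split at hi <;> simp_all
      subst hik
      refine ⟨le_refl i, ?_⟩
      simp only [List.length_cons]; push_cast; omega
    · have := ih (k + 1) i hi
      simp only [List.length_cons]
      push_cast
      omega

theorem pvPosFrom_eq_nil (k : Int) (l : List String) (c : String) (h : c ∉ l) :
    pvPosFrom k l c = [] := by
  induction l generalizing k with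
  | nil => rfl
  | cons x xs ih =>
    simp only [List.mem_cons, not_or] at h
    simp [pvPosFrom, Ne.symm h.1, ih (k + 1) h.2]

theorem pvPrzesunA_of_not_mem (lit : String) (l : List String) (h : lit ∉ l) :
    pvPrzesunA lit l = l := by
  induction l with
  | nil => rfl
  | cons x xs ih =>
    simp only [List.mem_cons, not_or] at h
    simp [pvPrzesunA, Ne.symm h.1, ih h.2]

theorem pvPosFrom_eq_cons (l : List String) (c : String) (i : Int) (rest : List Int) :
    ∀ k, pvPosFrom k l c = i :: rest →
    ∃ l₁ l₂, l = l₁ ++ c :: l₂ ∧ c ∉ l₁ ∧ i = k + l₁.length ∧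
      rest = pvPosFrom (i + 1) l₂ c := by
  induction l with
  | nil => intro k h; simp [pvPosFrom] at h
  | cons x xs ih =>
    intro k h
    by_cases hx : x = c
    · rw [pvPosFrom, if_pos hx, List.singleton_append] at h
      obtain ⟨hk, hrest⟩ := List.cons.inj h
      subst hk
      exact ⟨[], xs, by simp [hx], by simp, by simp, by rw [← hrest]⟩
    · simp only [pvPosFrom, if_neg hx, List.nil_append] at h
      obtain ⟨l₁, l₂, h1, h2, h3, h4⟩ := ih (k + 1) h
      refine ⟨x :: l₁, l₂, by simp [h1], ?_, by simp [h3]; omega, h4⟩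
      simp only [List.mem_cons, not_or]
      exact ⟨fun hcx => hx (Eq.symm hcx), h2⟩

theorem pvPrzesunA_first (lit : String) (l₁ l₂ : List String) (h : lit ∉ l₁) :
    pvPrzesunA lit (l₁ ++ lit :: l₂) = l₁ ++ pvCycleA lit :: l₂ := by
  induction l₁ with
  | nil => simp [pvPrzesunA]
  | cons x xs ih =>
    simp only [List.mem_cons, not_or] at h
    simp [pvPrzesunA, Ne.symm h.1, ih h.2]

theorem pvInsort_middle (p q : List Int) (x : Int)
    (hp : ∀ y ∈ p, y < x) (hq : ∀ y ∈ q, ¬ y < x) :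
    pvInsort (p ++ q) x = p ++ x :: q := by
  induction p with
  | nil =>
    cases q with
    | nil => rfl
    | cons z zs => simp [pvInsort, hq z (by simp)]
  | cons y ys ih =>
    simp only [List.cons_append, pvInsort, if_pos (hp y (by simp))]
    simp [ih (fun z hz => hp z (by simp [hz]))]

theorem pvCycleA_red (c : Char) : pvCycleA (String.ofList [c]) =
    if c.toNat = 90 then "A" else String.ofList [Char.ofNat (c.toNat + 1)] := by
  unfold pvCycleA
  rw [String.toList_ofList]

theorem pvCycle_single (c : Char) (hc : pvDomChar c = true) :
    (pvCycleA (String.ofList [c])).toList.length = 1 ∧ pvCycleA (String.ofList [c]) ≠ String.ofList [c] := by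
  have hle : c.toNat + 1 < 55296 := by
    simp only [pvDomChar, Bool.or_eq_true, Bool.and_eq_true, decide_eq_true_eq, beq_iff_eq] at hc
    omega
  have hof : (Char.ofNat (c.toNat + 1)).toNat = c.toNat + 1 := by
    have hv : Nat.isValidChar (c.toNat + 1) := Or.inl hle
    rw [Char.ofNat, dif_pos hv]
    rfl
  rw [pvCycleA_red]
  by_cases h90 : c.toNat = 90
  · rw [if_pos h90]
    refine ⟨by decide, fun h => ?_⟩
    have := congrArg (fun s => s.toList) h
    simp only [String.toList_ofList] at this
    have : ('A' : Char) = c := by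
      have h2 := this
      rw [show "A".toList = ['A'] from by decide] at h2
      exact List.cons.inj h2 |>.1
    rw [← this] at h90
    simp at h90
  · rw [if_neg h90]
    refine ⟨by rw [String.toList_ofList]; rfl, fun h => ?_⟩
    have := String.toList_inj.mpr h
    rw [String.toList_ofList, String.toList_ofList] at this
    have hce : Char.ofNat (c.toNat + 1) = c := (List.cons.inj this).1
    have : c.toNat + 1 = c.toNat := by rw [← hof, hce]
    omega

theorem pvPosFrom_ne_nil (k : Int) (l : List String) (c : String) (h : c ∈ l) :
    pvPosFrom k l c ≠ [] := by
  induction l generalizing k with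
  | nil => simp at h
  | cons x xs ih =>
    by_cases hx : x = c
    · simp [pvPosFrom, hx]
    · rcases List.mem_cons.mp h with h' | h'
      · exact absurd h'.symm hx
      · simp only [pvPosFrom, if_neg hx, List.nil_append]
        exact ih (k + 1) h'

theorem pvCycleBA (l : String) : pvCycleB l = pvCycleA l := rfl

theorem pvLits_cons (r : List String) (l : List (List String)) :
    pvLits (r :: l) = (if pvKom r = "DOPISZ" ∨ pvKom r = "ZMIEN" then [pvLit r] else []) ++ pvLits l := by
  simp only [pvLits, List.filterMap_cons]
  split_ifs <;> simp

-- the main loop invariant, by induction on the remaining command rows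
theorem pvMain (rows : List (List String)) :
    ∀ (napis : List String) (pos : PySem.Dict String (List Int)) (L : List String),
    (∀ row ∈ rows, (row.all (fun s => pvDomStr s)) = true) →
    (∀ c, pos.getD c [] = pvPosFrom 0 napis c) →
    (∀ x ∈ napis, x.toList.length = 1 ∨ x ∈ L) →
    pvBalOk napis.length rows = true →
    (∀ row ∈ rows, 2 ≤ row.length) →
    (∀ k, (hk : k < rows.length) → pvKom rows[k] = "PRZESUN" →
      (pvLit rows[k]).toList.length = 1 ∨
        (pvLit rows[k] ∉ L ∧ pvLit rows[k] ∉ pvLits (rows.take k))) →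
    rows.foldl pvStepA napis = (rows.foldl pvStepB (napis, pos)).1 := by
  induction rows with
  | nil => intro napis pos L _ _ _ _ _ _; rfl
  | cons row rest ih =>
    intro napis pos L Hdom Hinv Hel Hbal Hlen H2
    have Hdom' := fun r hr => Hdom r (List.mem_cons_of_mem _ hr)
    have Hlen' := fun r hr => Hlen r (List.mem_cons_of_mem _ hr)
    have H2' : ∀ k, (hk : k < rest.length) → pvKom rest[k] = "PRZESUN" →
        (pvLit rest[k]).toList.length = 1 ∨
          (pvLit rest[k] ∉ L ++ pvLits [row] ∧ pvLit rest[k] ∉ pvLits (rest.take k)) := by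
      intro k hk hkom
      have h := H2 (k + 1) (by simp only [List.length_cons]; omega)
        (by simpa using hkom)
      simp only [List.getElem_cons_succ] at h
      rcases h with h | ⟨ha, hb⟩
      · exact Or.inl h
      · refine Or.inr ⟨?_, ?_⟩
        · intro hm
          rcases List.mem_append.mp hm with hm | hm
          · exact ha hm
          · apply hb
            rw [List.take_succ_cons, pvLits_cons]
            rw [pvLits_cons] at hm
            rcases List.mem_append.mp hm with hm | hm
            · exact List.mem_append.mpr (Or.inl hm)
            · simp [pvLits] at hm
        · intro hm
          apply hb
          rw [List.take_succ_cons, pvLits_cons]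
          exact List.mem_append.mpr (Or.inr hm)
    have HelUp : ∀ x ∈ napis, x.toList.length = 1 ∨ x ∈ L ++ pvLits [row] := by
      intro x hx
      rcases Hel x hx with h | h
      · exact Or.inl h
      · exact Or.inr (List.mem_append.mpr (Or.inl h))
    simp only [List.foldl_cons, pvStepA, pvStepB]
    rw [show PySem.List.pyGetD row 0 "" = pvKom row from rfl,
        show PySem.List.pyGetD row 1 "" = pvLit row from rfl]
    simp only [pvBalOk] at Hbal
    split_ifs with h1 h2 h3 h4
    · -- DOPISZ
      rw [if_pos h1] at Hbal
      apply ih _ _ (L ++ pvLits [row]) Hdom'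
      · intro c
        rw [PySem.Dict.getD_insert, pvPosFrom_append]
        by_cases hc : c = pvLit row
        · subst hc
          rw [if_pos rfl, Hinv]
          simp [pvPosFrom]
        · have hcl : pvLit row ≠ c := fun h => hc h.symm
          rw [if_neg hc, Hinv]
          simp [pvPosFrom, hcl]
      · intro x hx
        rcases List.mem_append.mp hx with hx | hx
        · exact HelUp x hx
        · rcases List.mem_singleton.mp hx with rfl
          refine Or.inr (List.mem_append.mpr (Or.inr ?_))
          rw [pvLits_cons]
          simp [h1]
      · simpa using Hbal
      · exact Hlen'
      · exact H2'
    · -- ZMIEN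
      rw [if_neg h1, if_pos h2] at Hbal
      rw [Bool.and_eq_true] at Hbal
      obtain ⟨hd, Hbal'⟩ := Hbal
      have hd : 0 < napis.length := of_decide_eq_true hd
      obtain ⟨l', x, rfl⟩ := napis.eq_nil_or_concat.resolve_left (by
        intro h; rw [h] at hd; simp at hd)
      simp only [List.concat_eq_append] at Hinv Hel HelUp Hbal' hd ⊢
      rw [List.getLastD_concat, List.dropLast_concat]
      apply ih _ _ (L ++ pvLits [row]) Hdom'
      · intro c
        have hox : pos.getD x [] = pvPosFrom 0 l' x ++ [(l'.length : Int)] := by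
          rw [Hinv x, pvPosFrom_append]
          simp [pvPosFrom]
        have hpos1 : ∀ d, (pos.insert x (pos.getD x []).dropLast).getD d [] =
            if d = x then pvPosFrom 0 l' x else pos.getD d [] := by
          intro d
          rw [PySem.Dict.getD_insert, hox, List.dropLast_concat]
        have hlit1 : (pos.insert x (pos.getD x []).dropLast).getD (pvLit row) [] =
            pvPosFrom 0 l' (pvLit row) := by
          rw [hpos1]
          split_ifs with hlx
          · rw [hlx]
          · have hxl : x ≠ pvLit row := fun h => hlx h.symm
            rw [Hinv, pvPosFrom_append]
            simp [pvPosFrom, hxl]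
        rw [PySem.Dict.getD_insert, pvPosFrom_append]
        by_cases hc : c = pvLit row
        · subst hc
          rw [if_pos rfl, hlit1]
          simp [pvPosFrom]
        · have hcl : pvLit row ≠ c := fun h => hc h.symm
          rw [if_neg hc, hpos1]
          by_cases hcx : c = x
          · subst hcx
            simp [pvPosFrom, hcl]
          · have hxc : x ≠ c := fun h => hcx h.symm
            rw [if_neg hcx, Hinv, pvPosFrom_append]
            simp [pvPosFrom, hxc, hcl]
      · intro y hy
        rcases List.mem_append.mp hy with hy | hy
        · exact HelUp y (List.mem_append.mpr (Or.inl hy))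
        · rcases List.mem_singleton.mp hy with rfl
          refine Or.inr (List.mem_append.mpr (Or.inr ?_))
          rw [pvLits_cons]
          simp [h2]
      · simpa using Hbal'
      · exact Hlen'
      · exact H2'
    · -- USUN
      rw [if_neg h1, if_neg h2, if_pos h3] at Hbal
      rw [Bool.and_eq_true] at Hbal
      obtain ⟨hd, Hbal'⟩ := Hbal
      have hd : 0 < napis.length := of_decide_eq_true hd
      obtain ⟨l', x, rfl⟩ := napis.eq_nil_or_concat.resolve_left (by
        intro h; rw [h] at hd; simp at hd)
      simp only [List.concat_eq_append] at Hinv Hel HelUp Hbal' hd ⊢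
      rw [List.getLastD_concat, List.dropLast_concat]
      apply ih _ _ (L ++ pvLits [row]) Hdom'
      · intro c
        have hox : pos.getD x [] = pvPosFrom 0 l' x ++ [(l'.length : Int)] := by
          rw [Hinv x, pvPosFrom_append]
          simp [pvPosFrom]
        rw [PySem.Dict.getD_insert]
        by_cases hcx : c = x
        · subst hcx
          rw [if_pos rfl, hox, List.dropLast_concat]
        · have hxc : x ≠ c := fun h => hcx h.symm
          rw [if_neg hcx, Hinv, pvPosFrom_append]
          simp [pvPosFrom, hxc]
      · exact fun y hy => HelUp y (List.mem_append.mpr (Or.inl hy))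
      · have : (l' ++ [x]).length - 1 = l'.length := by simp
        rw [← this]
        exact Hbal'
      · exact Hlen'
      · exact H2'
    · -- PRZESUN
      rw [if_neg h1, if_neg h2, if_neg h3] at Hbal
      rw [Hinv (pvLit row)]
      rcases hcase : pvPosFrom 0 napis (pvLit row) with _ | ⟨i, rest'⟩
      · -- no occurrence: A's scan finds nothing, B's index is empty
        have hnm : pvLit row ∉ napis := fun hm => pvPosFrom_ne_nil 0 napis _ hm hcase
        rw [pvPrzesunA_of_not_mem _ _ hnm]
        exact ih _ _ (L ++ pvLits [row]) Hdom' Hinv HelUp Hbal Hlen' H2'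
      · obtain ⟨l₁, l₂, hdec, hnm1, hi, hrest⟩ := pvPosFrom_eq_cons napis _ i rest' 0 hcase
        have hi : i = (l₁.length : Int) := by omega
        subst hi
        -- the matched letter is a single Dom character
        have hmem : pvLit row ∈ napis := by rw [hdec]; simp
        have hlen1 : (pvLit row).toList.length = 1 := by
          have h20 := H2 0 (by simp) (by simpa using h4)
          simp only [List.getElem_cons_zero] at h20
          rcases h20 with h | h
          · exact h
          · rcases Hel _ hmem with h' | h'
            · exact h'
            · exact absurd h' h.1
        obtain ⟨ch, hch⟩ := List.length_eq_one_iff.mp hlen1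
        have hlit : pvLit row = String.ofList [ch] := by
          rw [← hch, String.ofList_toList]
        have hchdom : pvDomChar ch = true := by
          have hrow := Hdom row (List.mem_cons_self)
          have hlr : pvLit row ∈ row := by
            apply PySem.List.pyGetD_mem
            have := Hlen row (List.mem_cons_self)
            constructor <;> omega
          have := List.all_eq_true.mp hrow _ hlr
          have := List.all_eq_true.mp this ch (by rw [hch]; simp)
          exact this
        dsimp only
        obtain ⟨hv1, hvne⟩ := pvCycle_single ch hchdom
        rw [← hlit] at hv1 hvne
        -- B reads the same letter at position l₁.length
        have hget : PySem.List.pyGetD napis (l₁.length : Int) "" = pvLit row := by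
          rw [hdec, PySem.List.pyGetD_natCast]
          rw [List.getD_eq_getElem?_getD, List.getElem?_append_right (le_refl _)]
          simp
        rw [hget, pvCycleBA]
        have hset : PySem.List.pySetD napis (l₁.length : Int) (pvCycleA (pvLit row)) =
            l₁ ++ pvCycleA (pvLit row) :: l₂ := by
          rw [PySem.List.pySetD_natCast, hdec]
          rw [List.set_append_right _ _ (le_refl _)]
          simp
        rw [hset, hdec, pvPrzesunA_first _ _ _ hnm1]
        apply ih _ _ (L ++ pvLits [row]) Hdom'
        · intro c
          have hbounds1 := pvPosFrom_bounds 0 l₁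
          have hbounds2 := pvPosFrom_bounds ((l₁.length : Int) + 1) l₂
          have horig : ∀ d, pvPosFrom 0 napis d =
              pvPosFrom 0 l₁ d ++ ((if pvLit row = d then [(l₁.length : Int)] else []) ++
                pvPosFrom ((l₁.length : Int) + 1) l₂ d) := by
            intro d
            rw [hdec, pvPosFrom_append]
            simp [pvPosFrom]
          have hnew : pvPosFrom 0 (l₁ ++ pvCycleA (pvLit row) :: l₂) c =
              pvPosFrom 0 l₁ c ++ ((if pvCycleA (pvLit row) = c then [(l₁.length : Int)] else []) ++
                pvPosFrom ((l₁.length : Int) + 1) l₂ c) := by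
            rw [pvPosFrom_append]
            simp [pvPosFrom]
          rw [hnew, PySem.Dict.getD_insert]
          by_cases hcv : c = pvCycleA (pvLit row)
          · subst hcv
            rw [if_pos rfl, PySem.Dict.getD_insert, if_neg hvne, Hinv, horig]
            rw [if_neg (fun h => hvne (Eq.symm h))]
            rw [List.nil_append, if_pos rfl]
            apply pvInsort_middle
            · intro y hy
              have := hbounds1 _ y hy
              omega
            · intro y hy
              have := hbounds2 _ y hy
              omega
          · rw [if_neg hcv, PySem.Dict.getD_insert]
            by_cases hcl : c = pvLit row
            · subst hcl
              rw [if_pos rfl, if_neg (fun h => hcv (Eq.symm h)), hrest]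
              rw [pvPosFrom_eq_nil _ _ _ hnm1]
              simp
            · rw [if_neg hcl, Hinv, horig]
              rw [if_neg (fun h => hcl (Eq.symm h)), if_neg (fun h => hcv (Eq.symm h))]
        · intro y hy
          rcases List.mem_append.mp hy with hy | hy
          · exact HelUp y (by rw [hdec]; exact List.mem_append.mpr (Or.inl hy))
          · rcases List.mem_cons.mp hy with hy | hy
            · rw [hy]; exact Or.inl hv1
            · exact HelUp y (by rw [hdec]; simp [hy])
        · have : (l₁ ++ pvCycleA (pvLit row) :: l₂).length = napis.length := by
            rw [hdec]; simp
          rw [this]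
          exact Hbal
        · exact Hlen'
        · exact H2'
    · -- unknown command: both sides do nothing
      rw [if_neg h1, if_neg h2, if_neg h3] at Hbal
      exact ih _ _ (L ++ pvLits [row]) Hdom' Hinv HelUp Hbal Hlen' H2'

-- ===== VERDICT (by name: the statement is the Claim_ definition above) =====
theorem napis_kod_spec : Claim_equal_napis_kod := by
  intro tw hdom hpre
  obtain ⟨hlen, hbal, h3⟩ := hpre
  unfold Spec_napis_kod napis_kod napis_kod_alt
  apply pvMain tw [] PySem.Dict.empty []
  · intro r hr
    exact List.all_eq_true.mp hdom r hr
  · intro c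
    rfl
  · intro x hx
    simp at hx
  · exact hbal
  · exact hlen
  · intro k hk hkom
    rcases h3 k hk hkom with h | h
    · exact Or.inl h
    · exact Or.inr ⟨by simp, h⟩
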